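-- pv_equiv track=rewrite | github.com/keeganareeve/PhoneticsFlashcards | dutch_diphones_flashcards.py | create_word_lists
-- ===== SOURCE A (Python) =====
-- def create_word_lists(selected_lines):
--     list1 = []
--     list2 = []
--     list3 = []
--     for line in selected_lines:
--         words = line.split()
--         if len(words) >= 3:
--             list1.append(words[0])
--             list2.append(words[1])
--             list3.append(words[2])
--     return list1, list2, list3
-- ===== SOURCE B (Python) =====
-- def create_word_lists(selected_lines):
--     def column(k):
--         return [ws[k] for ws in map(str.split, selected_lines) if len(ws) >= 3]
--     return column(0), column(1), column(2)
-- ===== Notes on version B (the rewrite author's own statement) =====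
-- stated objective: alternative
-- what changed: B computes each of the three output columns independently: a helper makes its own full pass over the lines extracting the k-th token of every line with >= 3 tokens, called three times, instead of A's single loop appending to three accumulator lists at once.
import Mathlib
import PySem

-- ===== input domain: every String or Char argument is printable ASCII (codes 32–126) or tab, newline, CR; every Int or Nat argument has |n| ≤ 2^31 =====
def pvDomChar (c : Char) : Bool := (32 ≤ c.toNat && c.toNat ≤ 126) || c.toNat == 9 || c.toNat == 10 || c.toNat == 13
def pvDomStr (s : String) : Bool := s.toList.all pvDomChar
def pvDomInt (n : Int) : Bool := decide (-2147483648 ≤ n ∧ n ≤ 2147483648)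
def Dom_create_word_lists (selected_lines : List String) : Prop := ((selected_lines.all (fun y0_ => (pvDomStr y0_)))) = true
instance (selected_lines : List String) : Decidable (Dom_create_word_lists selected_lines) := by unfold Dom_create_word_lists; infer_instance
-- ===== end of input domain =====

-- B computes each output column in its own pass over the lines (helper called three
-- times) instead of A's single loop appending to three accumulator lists (alternative
-- decomposition, same cost).

-- ===== PORT A =====
-- loop appending words[0], words[1], words[2] to three accumulator lists
def create_word_lists (selected_lines : List String) : List String × List String × List String :=
  selected_lines.foldl
    (fun (acc : List String × List String × List String) line =>
      let words := PySem.Str.split₀ line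
      if words.length ≥ 3 then
        (acc.1 ++ [(PySem.List.pyGet? words 0).getD ""],
         acc.2.1 ++ [(PySem.List.pyGet? words 1).getD ""],
         acc.2.2 ++ [(PySem.List.pyGet? words 2).getD ""])
      else acc)
    ([], [], [])

-- ===== PORT B =====
-- column k: [ws[k] for ws in map(str.split, selected_lines) if len(ws) >= 3]
def cwl_column (selected_lines : List String) (k : Int) : List String :=
  ((selected_lines.map PySem.Str.split₀).filter (fun ws => ws.length ≥ 3)).map
    (fun ws => (PySem.List.pyGet? ws k).getD "")

def create_word_lists_alt (selected_lines : List String) : List String × List String × List String :=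
  (cwl_column selected_lines 0, cwl_column selected_lines 1, cwl_column selected_lines 2)

-- ===== PRECONDITION & SPEC =====
def Spec_create_word_lists (selected_lines : List String) (out : List String × List String × List String) : Prop := out = create_word_lists_alt selected_lines
instance (selected_lines : List String) (out : List String × List String × List String) : Decidable (Spec_create_word_lists selected_lines out) := by unfold Spec_create_word_lists; infer_instance

-- ===== CLAIM =====
def Claim_equal_create_word_lists : Prop := ∀ (selected_lines : List String), Dom_create_word_lists selected_lines → Spec_create_word_lists selected_lines (create_word_lists selected_lines)

-- ===== LEMMAS AND PROOFS =====
theorem cwl_fold_eq (ls : List String) :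
    ∀ a b c : List String,
      ls.foldl
        (fun (acc : List String × List String × List String) line =>
          let words := PySem.Str.split₀ line
          if words.length ≥ 3 then
            (acc.1 ++ [(PySem.List.pyGet? words 0).getD ""],
             acc.2.1 ++ [(PySem.List.pyGet? words 1).getD ""],
             acc.2.2 ++ [(PySem.List.pyGet? words 2).getD ""])
          else acc)
        (a, b, c)
      = (a ++ cwl_column ls 0, b ++ cwl_column ls 1, c ++ cwl_column ls 2) := by
  induction ls with
  | nil => intro a b c; simp [cwl_column]
  | cons line rest ih =>
    intro a b c
    simp only [List.foldl_cons]
    rcases h : PySem.Str.split₀ line with _ | ⟨w0, _ | ⟨w1, _ | ⟨w2, t⟩⟩⟩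
    · simp [cwl_column, h, ih]
    · simp [cwl_column, h, ih]
    · simp [cwl_column, h, ih]
    · have g0 : PySem.List.pyGet? (w0 :: w1 :: w2 :: t) 0 = some w0 := by
        simp [PySem.List.pyGet?, PySem.List.pyIdx?]
        rw [if_pos (show (0:Int) ≤ (t.length:Int)+1+1 by omega)]; simp
      have g1 : PySem.List.pyGet? (w0 :: w1 :: w2 :: t) 1 = some w1 := by
        simp [PySem.List.pyGet?, PySem.List.pyIdx?]
        rw [if_pos (show (0:Int) ≤ (t.length:Int)+1 by omega)]; simp
      have g2 : PySem.List.pyGet? (w0 :: w1 :: w2 :: t) 2 = some w2 := by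
        simp [PySem.List.pyGet?, PySem.List.pyIdx?]
        rw [if_pos (show (2:Int) ≤ (t.length:Int)+1+1 by omega)]; simp
      simp [cwl_column, h, ih, g0, g1, g2]

-- ===== VERDICT =====
theorem create_word_lists_spec : Claim_equal_create_word_lists := by
  intro ls _
  show create_word_lists ls = create_word_lists_alt ls
  unfold create_word_lists create_word_lists_alt
  simpa using cwl_fold_eq ls [] [] []
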